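-- pv_equiv track=rewrite | github.com/minus9d/programming_contest_archive | abc/432/c/c.py | solve
-- ===== SOURCE A (Python) =====
-- def solve(N, X, Y, A):
--
--     mod_list = []
--     for a in A:
--         mod_list.append((X * a) % (Y - X))
--     if len(set(mod_list)) > 1:
--         return -1
--
--     for i, a in enumerate(A):
--         if i == 0:
--             mn = a * X
--             mx = a * Y
--         else:
--             tmp_mn = a * X
--             tmp_mx = a * Y
--
--             mn = max(tmp_mn, mn)
--             mx = min(tmp_mx, mx)
--
--     if mn <= mx:
--         ans = 0
--         for a in A:
--             ans += (mx - a * X) // (Y - X)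
--         return ans
--     else:
--         return -1
-- ===== SOURCE B (Python) =====
-- def solve(N, X, Y, A):
--     # Feasibility via one divisibility test on the gcd of differences (d | X*g),
--     # extremes of the raw a's dispatched on the signs of X and Y, and a
--     # closed-form total instead of a per-element floored sum.
--     d = Y - X
--     a0 = A[0]
--     g = 0
--     amin = amax = a0
--     s = 0
--     n = 0
--     for a in A:
--         x, y = abs(g), abs(a - a0)
--         while y:
--             x, y = y, x % y
--         g = x
--         if a < amin:
--             amin = a
--         if a > amax:
--             amax = a
--         s += a
--         n += 1
--     if (X * g) % d != 0:
--         return -1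
--     mn = X * (amax if X >= 0 else amin)
--     mx = Y * (amin if Y >= 0 else amax)
--     if mn > mx:
--         return -1
--     hi = mx - (mx - X * a0) % d
--     return (n * hi - X * s) // d
-- ===== Notes on version B (the rewrite author's own statement) =====
-- stated objective: alternative
-- what changed: B replaces A's residue set by a single divisibility test on the gcd of differences (d | X*gcd(a_i - a_0)), takes min/max of the raw a's with a sign dispatch on X and Y instead of per-element products, and returns a closed-form total instead of A's per-element floored sum.
import Mathlib
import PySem

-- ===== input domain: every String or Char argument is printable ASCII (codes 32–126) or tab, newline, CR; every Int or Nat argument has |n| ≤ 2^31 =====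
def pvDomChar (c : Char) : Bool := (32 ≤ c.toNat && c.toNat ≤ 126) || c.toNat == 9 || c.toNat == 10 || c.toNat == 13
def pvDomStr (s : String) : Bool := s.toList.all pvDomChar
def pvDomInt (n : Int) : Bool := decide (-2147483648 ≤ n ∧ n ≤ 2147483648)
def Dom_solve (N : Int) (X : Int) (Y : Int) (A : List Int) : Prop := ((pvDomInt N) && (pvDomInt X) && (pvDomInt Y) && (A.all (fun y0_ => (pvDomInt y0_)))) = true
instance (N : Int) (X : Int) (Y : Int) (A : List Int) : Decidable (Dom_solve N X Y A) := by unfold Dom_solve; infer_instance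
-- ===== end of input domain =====

-- B decides feasibility by a single divisibility test on the gcd of differences (d | X*g),
-- takes extremes of the raw a's dispatched on the signs of X and Y, and returns a
-- closed-form total instead of A's residue set, per-element extremal products and floored sum
-- (objective: alternative).


-- ===== PORT A =====
def solve (N : Int) (X : Int) (Y : Int) (A : List Int) : Int :=
  let modList := A.foldl (fun acc a => acc ++ [PySem.Int.mod (X * a) (Y - X)]) ([] : List Int)
  if (PySem.Set.ofList modList).length > 1 then -1
  else
    match (PySem.List.enumerate A).foldl
        (fun (acc : Option (Int × Int)) (p : Int × Int) =>
          if p.1 = 0 then some (p.2 * X, p.2 * Y)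
          else
            match acc with
            | some (mn, mx) => some (max (p.2 * X) mn, min (p.2 * Y) mx)
            | none => none) none with
    | some (mn, mx) =>
        if mn ≤ mx then A.foldl (fun ans a => ans + PySem.Int.floordiv (mx - a * X) (Y - X)) 0
        else -1
    | none => 0     -- unreachable under Pre_solve (A nonempty); Python raises NameError here

-- ===== PORT B =====
-- B's inner `while y: x, y = y, x % y` Euclid loop, on absolute values (both nonneg)
def pyGcdNat (x : Nat) (y : Nat) : Nat :=
  match y with
  | 0 => x
  | Nat.succ y' => pyGcdNat (y' + 1) (x % (y' + 1))
termination_by y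
decreasing_by exact Nat.mod_lt _ (Nat.succ_pos _)

def pyGcd (a b : Int) : Int := Int.ofNat (pyGcdNat a.natAbs b.natAbs)

def solve_alt (N : Int) (X : Int) (Y : Int) (A : List Int) : Int :=
  match A with
  | [] => 0      -- unreachable under Pre_solve; Python B raises IndexError on A[0]
  | a0 :: _ =>
    let d := Y - X
    let st := A.foldl
      (fun (st : Int × Int × Int × Int × Int) a =>
        match st with
        | (g, amin, amax, s, n) =>
          (pyGcd g (a - a0),
           if a < amin then a else amin,
           if amax < a then a else amax,
           s + a,
           n + 1))
      ((0 : Int), a0, a0, (0 : Int), (0 : Int))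
    match st with
    | (g, amin, amax, s, n) =>
      if PySem.Int.mod (X * g) d ≠ 0 then -1
      else
        let mn := X * (if 0 ≤ X then amax else amin)
        let mx := Y * (if 0 ≤ Y then amin else amax)
        if mn > mx then -1
        else
          let hi := mx - PySem.Int.mod (mx - X * a0) d
          PySem.Int.floordiv (n * hi - X * s) d

-- ===== PRECONDITION & SPEC =====
-- Pre_ excludes empty A (Python A raises NameError: mn/mx never assigned) and X = Y (ZeroDivisionError).
def Pre_solve (N : Int) (X : Int) (Y : Int) (A : List Int) : Prop := A ≠ [] ∧ X ≠ Y
instance (N : Int) (X : Int) (Y : Int) (A : List Int) : Decidable (Pre_solve N X Y A) := by unfold Pre_solve; infer_instance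
def pvWitness_solve : Int × Int × Int × List Int := (2, 1, 3, [1, 2])

def Spec_solve (N : Int) (X : Int) (Y : Int) (A : List Int) (out : Int) : Prop := out = solve_alt N X Y A
instance (N : Int) (X : Int) (Y : Int) (A : List Int) (out : Int) : Decidable (Spec_solve N X Y A out) := by unfold Spec_solve; infer_instance

-- ===== CLAIM (what is proved, stated in full; the proofs are below) =====
def Claim_equal_solve : Prop := ∀ (N : Int) (X : Int) (Y : Int) (A : List Int), Dom_solve N X Y A → Pre_solve N X Y A → Spec_solve N X Y A (solve N X Y A)

-- ===== LEMMAS AND PROOFS =====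

-- a list with two distinct members has more than one element
lemma pv_one_lt_length_of_two_mem {α : Type} {s : List α} {x y : α}
    (hx : x ∈ s) (hy : y ∈ s) (hxy : x ≠ y) : 1 < s.length := by
  match s with
  | [] => simp at hx
  | [z] =>
      simp at hx hy
      simp_all
  | a :: b :: t => simp

-- fmod is invariant under shifting by a multiple of the divisor
lemma pv_mod_shift (x d k : Int) : PySem.Int.mod (x + d * k) d = PySem.Int.mod x d := by
  simp [PySem.Int.mod]

-- Python % agreement is divisibility of the difference
lemma pv_mod_eq_iff (x y d : Int) : PySem.Int.mod x d = PySem.Int.mod y d ↔ d ∣ x - y := by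
  constructor
  · intro h
    have hx := PySem.Int.floordiv_mul_add_mod x d
    have hy := PySem.Int.floordiv_mul_add_mod y d
    exact ⟨PySem.Int.floordiv x d - PySem.Int.floordiv y d, by rw [h] at hx; linarith⟩
  · rintro ⟨k, hk⟩
    have : x = y + d * k := by linarith
    rw [this, pv_mod_shift]

-- Python % is zero exactly on multiples of the divisor
lemma pv_mod_zero_iff (z d : Int) : PySem.Int.mod z d = 0 ↔ d ∣ z := by
  have h0 : PySem.Int.mod 0 d = 0 := by simp [PySem.Int.mod]
  rw [← h0, pv_mod_eq_iff, sub_zero]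

-- B's Euclid loop is the gcd
lemma pv_pyGcdNat_eq (y : Nat) : ∀ x, pyGcdNat x y = Nat.gcd x y := by
  induction y using Nat.strong_induction_on with
  | _ y ih =>
    intro x
    match y with
    | 0 => simp [pyGcdNat]
    | Nat.succ y' =>
        rw [pyGcdNat, ih (x % (y' + 1)) (Nat.mod_lt _ (Nat.succ_pos _)),
            Nat.gcd_comm, ← Nat.gcd_rec, Nat.gcd_comm]

lemma pv_pyGcd_eq (a b : Int) : pyGcd a b = ↑(Int.gcd a b) := by
  simp [pyGcd, pv_pyGcdNat_eq, Int.gcd]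

-- divisibility of a scaled gcd splits into the two scaled divisibilities
lemma pv_dvd_pyGcd (d X g b : Int) : d ∣ X * pyGcd g b ↔ (d ∣ X * g ∧ d ∣ X * b) := by
  rw [pv_pyGcd_eq]
  constructor
  · intro h
    exact ⟨h.trans (mul_dvd_mul_left X (Int.gcd_dvd_left g b)),
           h.trans (mul_dvd_mul_left X (Int.gcd_dvd_right g b))⟩
  · rintro ⟨h1, h2⟩
    have h1' : (↑d.natAbs : Int) ∣ X * g := (Int.natAbs_dvd).mpr h1
    have h2' : (↑d.natAbs : Int) ∣ X * b := (Int.natAbs_dvd).mpr h2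
    have hg : d.natAbs ∣ Int.gcd (X * g) (X * b) := Int.dvd_gcd h1' h2'
    rw [Int.gcd_mul_left] at hg
    have hcast : (↑d.natAbs : Int) ∣ ↑(X.natAbs * Int.gcd g b) := Int.ofNat_dvd.mpr hg
    rw [Nat.cast_mul] at hcast
    have habs : d ∣ (↑X.natAbs : Int) * ↑(Int.gcd g b) := (Int.natAbs_dvd).mp hcast
    have : (↑X.natAbs : Int) * ↑(Int.gcd g b) = |X * ↑(Int.gcd g b)| := by
      rw [abs_mul, Int.abs_natCast, Int.abs_eq_natAbs]
    rw [this, dvd_abs] at habs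
    exact habs

-- B's running gcd of differences: scaled divisibility over the whole list
lemma pv_gcd_fold (d X a0 : Int) (l : List Int) :
    ∀ g0, (d ∣ X * l.foldl (fun g a => pyGcd g (a - a0)) g0) ↔
      (d ∣ X * g0 ∧ ∀ a ∈ l, d ∣ X * (a - a0)) := by
  induction l with
  | nil => intro g0; simp
  | cons a t ih =>
      intro g0
      simp only [List.foldl]
      rw [ih, pv_dvd_pyGcd]
      constructor
      · rintro ⟨⟨hg, ha⟩, ht⟩
        refine ⟨hg, ?_⟩
        intro x hx
        rcases List.mem_cons.mp hx with h | h
        · subst h; exact ha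
        · exact ht x h
      · rintro ⟨hg, hall⟩
        exact ⟨⟨hg, hall a (by simp)⟩, fun x hx => hall x (by simp [hx])⟩

-- B's fused loop split into its five independent folds
lemma pv_bfold (a0 : Int) (l : List Int) :
    ∀ (g c1 c2 s n : Int),
      l.foldl
        (fun (st : Int × Int × Int × Int × Int) a =>
          match st with
          | (g, amin, amax, s, n) =>
            (pyGcd g (a - a0),
             if a < amin then a else amin,
             if amax < a then a else amax,
             s + a,
             n + 1)) (g, c1, c2, s, n)
      = (l.foldl (fun g a => pyGcd g (a - a0)) g,
         l.foldl (fun m a => if a < m then a else m) c1,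
         l.foldl (fun m a => if m < a then a else m) c2,
         s + l.sum,
         n + l.length) := by
  induction l with
  | nil => intro g c1 c2 s n; simp
  | cons a t ih =>
      intro g c1 c2 s n
      simp only [List.foldl, List.sum_cons, List.length_cons]
      rw [ih]
      simp only [Prod.mk.injEq]
      exact ⟨trivial, trivial, trivial, by ring, by push_cast; ring⟩

-- scaling a running max by a nonnegative factor
lemma pv_scale_max_nonneg (X : Int) (hX : 0 ≤ X) (l : List Int) :
    ∀ c, l.foldl (fun m a => max (a * X) m) (c * X) = (l.foldl (fun m a => max a m) c) * X := by
  induction l with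
  | nil => intro c; rfl
  | cons a t ih =>
      intro c
      simp only [List.foldl]
      rw [← max_mul_of_nonneg a c hX, ih]

-- scaling a running max by a nonpositive factor turns it into a running min
lemma pv_scale_max_nonpos (X : Int) (hX : X ≤ 0) (l : List Int) :
    ∀ c, l.foldl (fun m a => max (a * X) m) (c * X) = (l.foldl (fun m a => min a m) c) * X := by
  induction l with
  | nil => intro c; rfl
  | cons a t ih =>
      intro c
      simp only [List.foldl]
      have hstep : max (a * X) (c * X) = (min a c) * X := by
        rcases le_total a c with h | h
        · rw [min_eq_left h, max_eq_left (mul_le_mul_of_nonpos_right h hX)]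
        · rw [min_eq_right h, max_eq_right (mul_le_mul_of_nonpos_right h hX)]
      rw [hstep, ih]

-- scaling a running min by a nonnegative factor
lemma pv_scale_min_nonneg (X : Int) (hX : 0 ≤ X) (l : List Int) :
    ∀ c, l.foldl (fun m a => min (a * X) m) (c * X) = (l.foldl (fun m a => min a m) c) * X := by
  induction l with
  | nil => intro c; rfl
  | cons a t ih =>
      intro c
      simp only [List.foldl]
      rw [← min_mul_of_nonneg a c hX, ih]

-- scaling a running min by a nonpositive factor turns it into a running max
lemma pv_scale_min_nonpos (X : Int) (hX : X ≤ 0) (l : List Int) :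
    ∀ c, l.foldl (fun m a => min (a * X) m) (c * X) = (l.foldl (fun m a => max a m) c) * X := by
  induction l with
  | nil => intro c; rfl
  | cons a t ih =>
      intro c
      simp only [List.foldl]
      have hstep : min (a * X) (c * X) = (max a c) * X := by
        rcases le_total a c with h | h
        · rw [max_eq_right h, min_eq_right (mul_le_mul_of_nonpos_right h hX)]
        · rw [max_eq_left h, min_eq_left (mul_le_mul_of_nonpos_right h hX)]
      rw [hstep, ih]

-- B's comparison folds are the min/max folds
lemma pv_if_min : (fun (m a : Int) => if a < m then a else m) = (fun (m a : Int) => min a m) := by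
  funext m a; split_ifs with h <;> omega
lemma pv_if_max : (fun (m a : Int) => if m < a then a else m) = (fun (m a : Int) => max a m) := by
  funext m a; split_ifs with h <;> omega

-- a set built from a constant nonempty list is the singleton
lemma pv_ofList_const {r0 : Int} {l : List Int} (h : ∀ x ∈ l, x = r0) :
    PySem.Set.ofList (r0 :: l) = [r0] := by
  have hadd : PySem.Set.add ([] : List Int) r0 = [r0] := by
    simp [PySem.Set.add, PySem.Set.contains]
  have key : ∀ (t : List Int), (∀ x ∈ t, x = r0) → List.foldl PySem.Set.add [r0] t = [r0] := by
    intro t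
    induction t with
    | nil => intro _; rfl
    | cons a u ih =>
        intro ht
        have ha := ht a (by simp)
        subst ha
        have hstep : PySem.Set.add [a] a = [a] := by
          simp [PySem.Set.add, PySem.Set.contains]
        simp only [List.foldl, hstep]
        exact ih (fun x hx => ht x (by simp [hx]))
  show List.foldl PySem.Set.add [] (r0 :: l) = [r0]
  simp only [List.foldl, hadd]
  exact key l h

-- A's enumerate fold, for indices starting at k ≥ 1, is a pair of plain folds
lemma pv_enum_fold (X Y : Int) (l : List Int) :
    ∀ (k : Int), 1 ≤ k → ∀ (mn mx : Int),
      (PySem.List.enumerate l k).foldl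
        (fun (acc : Option (Int × Int)) (p : Int × Int) =>
          if p.1 = 0 then some (p.2 * X, p.2 * Y)
          else
            match acc with
            | some (mn, mx) => some (max (p.2 * X) mn, min (p.2 * Y) mx)
            | none => none) (some (mn, mx))
      = some (l.foldl (fun m a => max (a * X) m) mn, l.foldl (fun m a => min (a * Y) m) mx) := by
  induction l with
  | nil => intro k _ mn mx; rfl
  | cons a t ih =>
      intro k hk mn mx
      rw [PySem.List.enumerate_cons]
      have hk0 : ¬ (k = 0) := by omega
      simp only [List.foldl, hk0, if_false]
      exact ih (k + 1) (by omega) (max (a * X) mn) (min (a * Y) mx)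

-- pulling the common factor out of the sum
lemma pv_map_mul_sum (X : Int) (l : List Int) : (l.map (fun a => X * a)).sum = X * l.sum := by
  induction l with
  | nil => simp
  | cons b t ih => simp only [List.map_cons, List.sum_cons, ih]; ring

-- each summand of A's third loop, times d
lemma pv_term (X d mx r0 a : Int) (hr : PySem.Int.mod (X * a) d = r0) :
    d * PySem.Int.floordiv (mx - a * X) d = mx - a * X - PySem.Int.mod (mx - r0) d := by
  have h1 := PySem.Int.floordiv_mul_add_mod (mx - a * X) d
  have h2 := PySem.Int.floordiv_mul_add_mod (X * a) d
  rw [hr] at h2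
  have hshift : mx - a * X = (mx - r0) + d * (-(PySem.Int.floordiv (X * a) d)) := by
    have h2' : PySem.Int.floordiv (X * a) d * d + r0 = a * X := by
      rw [mul_comm a X]; exact h2
    linarith
  have hm : PySem.Int.mod (mx - a * X) d = PySem.Int.mod (mx - r0) d := by
    rw [hshift, pv_mod_shift]
  rw [← hm]
  linarith

-- the closed form equals A's per-element floored sum
lemma pv_sum_eq (X d mx r0 : Int) (hd : d ≠ 0) (A : List Int)
    (h : ∀ a ∈ A, PySem.Int.mod (X * a) d = r0) :
    A.foldl (fun ans a => ans + PySem.Int.floordiv (mx - a * X) d) 0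
      = PySem.Int.floordiv
          ((A.length : Int) * (mx - PySem.Int.mod (mx - r0) d) - (A.map (fun a => X * a)).sum) d := by
  have hsum : d * (A.map (fun a => PySem.Int.floordiv (mx - a * X) d)).sum
      = (A.length : Int) * (mx - PySem.Int.mod (mx - r0) d) - (A.map (fun a => X * a)).sum := by
    induction A with
    | nil => simp
    | cons a t ih =>
        have ha := pv_term X d mx r0 a (h a (by simp))
        have iht := ih (fun x hx => h x (by simp [hx]))
        simp only [List.map, List.sum_cons, List.length_cons]
        push_cast
        rw [mul_add, ha, iht]
        ring
  rw [PySem.List.foldl_add, zero_add, ← hsum]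
  show _ = (d * (A.map (fun a => PySem.Int.floordiv (mx - a * X) d)).sum).fdiv d
  rw [Int.mul_fdiv_cancel_left _ hd]

-- ===== VERDICT (by name: the statement is the Claim_ definition above) =====
theorem solve_spec : Claim_equal_solve := by
  intro N X Y A hdom hpre
  unfold Spec_solve
  obtain ⟨hne, hXY⟩ := hpre
  obtain ⟨a0, rest, rfl⟩ := List.exists_cons_of_ne_nil hne
  have hd : Y - X ≠ 0 := sub_ne_zero.mpr (Ne.symm hXY)
  -- normalize B
  show solve N X Y (a0 :: rest) = _
  simp only [solve_alt]
  rw [pv_bfold]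
  simp only [pv_if_min, pv_if_max]
  -- link B's divisibility test to A's residue agreement
  have hdvd_iff : (PySem.Int.mod (X * ((a0 :: rest).foldl (fun g a => pyGcd g (a - a0)) 0)) (Y - X) = 0)
      ↔ ∀ a ∈ rest, PySem.Int.mod (X * a) (Y - X) = PySem.Int.mod (X * a0) (Y - X) := by
    rw [pv_mod_zero_iff, pv_gcd_fold]
    constructor
    · rintro ⟨-, hall⟩ a ha
      rw [pv_mod_eq_iff]
      have := hall a (by simp [ha])
      rwa [mul_sub] at this
    · intro hall
      refine ⟨by simp, ?_⟩
      intro a ha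
      rcases List.mem_cons.mp ha with h | h
      · subst h; simp
      · rw [mul_sub, ← pv_mod_eq_iff]; exact hall a h
  simp only [List.foldl_cons, sub_self] at hdvd_iff
  by_cases hall : ∀ a ∈ rest, PySem.Int.mod (X * a) (Y - X) = PySem.Int.mod (X * a0) (Y - X)
  · -- all residues coincide: both sides go through the extremal phase
    rw [if_neg (by simpa [hdvd_iff] using hall)]
    have hmap : ∀ x ∈ rest.map (fun a => PySem.Int.mod (X * a) (Y - X)),
        x = PySem.Int.mod (X * a0) (Y - X) := by
      intro x hx
      obtain ⟨a, ha, rfl⟩ := List.mem_map.mp hx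
      exact hall a ha
    have hset := pv_ofList_const hmap
    have hall' : ∀ a ∈ a0 :: rest,
        PySem.Int.mod (X * a) (Y - X) = PySem.Int.mod (X * a0) (Y - X) := by
      intro a ha
      rcases List.mem_cons.mp ha with h | h
      · subst h; rfl
      · exact hall a h
    unfold solve
    simp only [PySem.List.foldl_append_singleton_eq_map, List.nil_append, List.map_cons]
    rw [hset]
    norm_num
    rw [pv_enum_fold X Y rest 1 (by norm_num) (a0 * X) (a0 * Y)]
    -- the two extremal computations agree
    have hmn : rest.foldl (fun m a => max (a * X) m) (a0 * X)
        = (if 0 ≤ X then X * rest.foldl (fun m a => max a m) a0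
           else X * rest.foldl (fun m a => min a m) a0) := by
      split_ifs with hX
      · rw [pv_scale_max_nonneg X hX rest a0, mul_comm]
      · rw [pv_scale_max_nonpos X (by omega) rest a0, mul_comm]
    have hmx : rest.foldl (fun m a => min (a * Y) m) (a0 * Y)
        = (if 0 ≤ Y then Y * rest.foldl (fun m a => min a m) a0
           else Y * rest.foldl (fun m a => max a m) a0) := by
      split_ifs with hY
      · rw [pv_scale_min_nonneg Y hY rest a0, mul_comm]
      · rw [pv_scale_min_nonpos Y (by omega) rest a0, mul_comm]
    rw [← hmn, ← hmx]
    set MN := rest.foldl (fun m a => max (a * X) m) (a0 * X) with hMN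
    set MX := rest.foldl (fun m a => min (a * Y) m) (a0 * Y) with hMX
    show (if MN ≤ MX then
        List.foldl (fun ans a => ans + PySem.Int.floordiv (MX - a * X) (Y - X))
          (PySem.Int.floordiv (MX - a0 * X) (Y - X)) rest
      else -1) = _
    by_cases hcmp : MN ≤ MX
    · rw [if_pos hcmp, if_neg (not_lt.mpr hcmp)]
      have hfold0 : List.foldl (fun ans a => ans + PySem.Int.floordiv (MX - a * X) (Y - X))
            (PySem.Int.floordiv (MX - a0 * X) (Y - X)) rest
          = List.foldl (fun ans a => ans + PySem.Int.floordiv (MX - a * X) (Y - X)) 0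
              (a0 :: rest) := by
        simp [List.foldl]
      rw [hfold0]
      rw [pv_sum_eq X (Y - X) MX (PySem.Int.mod (X * a0) (Y - X)) hd (a0 :: rest) hall']
      -- identical closed forms: shift the residue base from r0 to X*a0 and pull X out of the sum
      have hr : PySem.Int.mod (MX - PySem.Int.mod (X * a0) (Y - X)) (Y - X)
          = PySem.Int.mod (MX - X * a0) (Y - X) := by
        rw [pv_mod_eq_iff]
        have h2 := PySem.Int.floordiv_mul_add_mod (X * a0) (Y - X)
        exact ⟨PySem.Int.floordiv (X * a0) (Y - X), by linarith⟩
      rw [hr]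
      congr 1
      rw [pv_map_mul_sum]
      simp only [List.length_cons, List.sum_cons]
      push_cast
      ring
    · rw [if_neg hcmp, if_pos (lt_of_not_ge hcmp)]
  · -- a residue mismatch: both sides return -1
    rw [if_pos (by simpa [hdvd_iff] using hall)]
    rcases not_forall.mp hall with ⟨b, hb⟩
    rw [Classical.not_imp] at hb
    obtain ⟨hbm, hbne⟩ := hb
    unfold solve
    simp only [PySem.List.foldl_append_singleton_eq_map, List.nil_append, List.map_cons]
    have h1 : PySem.Int.mod (X * a0) (Y - X)
        ∈ PySem.Set.ofList (PySem.Int.mod (X * a0) (Y - X)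
            :: rest.map (fun a => PySem.Int.mod (X * a) (Y - X))) := by
      rw [PySem.Set.mem_ofList]; simp
    have h2 : PySem.Int.mod (X * b) (Y - X)
        ∈ PySem.Set.ofList (PySem.Int.mod (X * a0) (Y - X)
            :: rest.map (fun a => PySem.Int.mod (X * a) (Y - X))) := by
      rw [PySem.Set.mem_ofList]
      exact List.mem_cons_of_mem _ (List.mem_map_of_mem hbm)
    have hgt := pv_one_lt_length_of_two_mem h2 h1 hbne
    rw [if_pos hgt]
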